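-- pv_equiv track=rewrite | github.com/LexSteine/Fortune_favors_the_bold | Task14.py | w8
-- ===== SOURCE A (Python) =====
-- def w8(time, light):
--     count = 0
--     curr = True
--     while count < time:
--         if curr:
--             count += light[1] #skip red
--             curr = False
--         else:
--             count += light[2] #skip green
--             curr = True
--     if curr and (count == time or count > time):
--         return time # + light[1]
--     elif not curr and count > time:
--         return count
--     elif not curr and count == time:
--         return time
-- ===== SOURCE B (Python) =====
-- def w8(time, light):
--     if time <= 0:
--         return time
--     a = light[1]
--     if a >= time:
--         return a if a > time else time
--     s = a + light[2]
--     k0 = -(-time // s)          # first k with k*s >= time  (even exit, return time)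
--     k1 = -((a - time) // s)     # first k with k*s + a >= time  (odd exit)
--     if k1 < k0:
--         c = k1 * s + a
--         return c if c > time else time
--     return time
-- ===== Notes on version B (the rewrite author's own statement) =====
-- stated objective: alternative
-- what changed: B replaces A's step-by-step simulation of alternating red/green intervals with a closed-form ceiling-division computation of the first cycle index at which the accumulated time reaches the target (O(1) arithmetic instead of a loop over cycles).
import Mathlib
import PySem

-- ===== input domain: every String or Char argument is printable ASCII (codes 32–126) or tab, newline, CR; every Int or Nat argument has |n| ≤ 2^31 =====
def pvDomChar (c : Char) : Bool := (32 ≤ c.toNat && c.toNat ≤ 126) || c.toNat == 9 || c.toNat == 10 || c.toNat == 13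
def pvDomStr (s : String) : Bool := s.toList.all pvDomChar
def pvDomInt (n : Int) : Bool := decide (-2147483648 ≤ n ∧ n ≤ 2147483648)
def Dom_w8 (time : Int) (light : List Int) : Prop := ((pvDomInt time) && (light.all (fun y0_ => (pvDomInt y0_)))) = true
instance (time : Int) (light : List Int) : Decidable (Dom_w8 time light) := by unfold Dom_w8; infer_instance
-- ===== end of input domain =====

-- B computes the loop's exit state in closed form by ceiling division over the cycle length light[1]+light[2], instead of simulating the loop.

-- ===== PORT A =====
-- A's while loop, transliterated with a fuel bound (2*time+2 steps always suffice under Pre_; fuel only makes the same computation total).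
def w8loop (time a b : Int) : Nat → Int → Bool → Int × Bool
  | 0, count, curr => (count, curr)
  | f + 1, count, curr =>
    if count < time then
      if curr then w8loop time a b f (count + a) false
      else w8loop time a b f (count + b) true
    else (count, curr)

def w8 (time : Int) (light : List Int) : Int :=
  let a := PySem.List.pyGetD light 1 0
  let b := PySem.List.pyGetD light 2 0
  let r := w8loop time a b (2 * time.toNat + 2) 0 true
  if r.2 = true ∧ (r.1 = time ∨ time < r.1) then time
  else if r.2 = false ∧ time < r.1 then r.1
  else if r.2 = false ∧ r.1 = time then time
  else 0   -- Python would fall off and return None; unreachable under Pre_w8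

-- ===== PORT B =====
def w8_alt (time : Int) (light : List Int) : Int :=
  if time ≤ 0 then time
  else
    let a := PySem.List.pyGetD light 1 0
    if time ≤ a then (if time < a then a else time)
    else
      let s := a + PySem.List.pyGetD light 2 0
      let k0 := -(PySem.Int.floordiv (-time) s)
      let k1 := -(PySem.Int.floordiv (a - time) s)
      if k1 < k0 then
        let c := k1 * s + a
        (if time < c then c else time)
      else time

-- ===== PRECONDITION & SPEC =====
-- Pre_w8 holds exactly when A terminates without raising: either time ≤ 0 (loop never runs), or
-- light[1] exists and alone reaches time, or light[1], light[2] exist with positive cycle sum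
-- (otherwise A raises IndexError or loops forever).
def Pre_w8 (time : Int) (light : List Int) : Prop :=
  time ≤ 0 ∨ (2 ≤ light.length ∧
    (time ≤ PySem.List.pyGetD light 1 0 ∨
      (3 ≤ light.length ∧ 1 ≤ PySem.List.pyGetD light 1 0 + PySem.List.pyGetD light 2 0)))
instance (time : Int) (light : List Int) : Decidable (Pre_w8 time light) := by unfold Pre_w8; infer_instance
def pvWitness_w8 : Int × List Int := (10, [0, 3, 4])
def Spec_w8 (time : Int) (light : List Int) (out : Int) : Prop := out = w8_alt time light
instance (time : Int) (light : List Int) (out : Int) : Decidable (Spec_w8 time light out) := by unfold Spec_w8; infer_instance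

-- ===== CLAIM (what is proved, stated in full; the proofs are below) =====
def Claim_equal_w8 : Prop := ∀ (time : Int) (light : List Int), Dom_w8 time light → Pre_w8 time light → Spec_w8 time light (w8 time light)

-- ===== LEMMAS AND PROOFS =====

-- Characterization of A's loop from an even-phase state j*(a+b) with curr = true, given the
-- minimal exit cycle indices k0 (even exit) and k1 (odd exit).
theorem w8loop_char (time a b k0 k1 : Int)
    (hs : 1 ≤ a + b)
    (hk0 : time ≤ k0 * (a + b)) (hk0' : (k0 - 1) * (a + b) < time)
    (hk1 : time ≤ k1 * (a + b) + a) (hk1' : (k1 - 1) * (a + b) + a < time) :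
    ∀ (d : Nat) (j : Int) (f : Nat), 0 ≤ j → j ≤ k0 → j ≤ k1 →
      (k0 - j).toNat ≤ d → 2 * d + 2 ≤ f →
      w8loop time a b f (j * (a + b)) true =
        if k1 < k0 then (k1 * (a + b) + a, false) else (k0 * (a + b), true) := by
  intro d
  induction d with
  | zero =>
    intro j f hj0 hjk0 hjk1 hd hf
    have hj : j = k0 := by omega
    subst hj
    obtain ⟨f', rfl⟩ : ∃ f', f = f' + 1 := ⟨f - 1, by omega⟩
    have hlt : ¬ (j * (a + b) < time) := by omega
    have hnk : ¬ (k1 < j) := by omega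
    simp [w8loop, hlt, hnk]
  | succ d ih =>
    intro j f hj0 hjk0 hjk1 hd hf
    by_cases hjeq : j = k0
    · subst hjeq
      obtain ⟨f', rfl⟩ : ∃ f', f = f' + 1 := ⟨f - 1, by omega⟩
      have hlt : ¬ (j * (a + b) < time) := by omega
      have hnk : ¬ (k1 < j) := by omega
      simp [w8loop, hlt, hnk]
    · have hjlt : j < k0 := lt_of_le_of_ne hjk0 hjeq
      -- j*(a+b) < time since j ≤ k0 - 1
      have hmono : j * (a + b) ≤ (k0 - 1) * (a + b) :=
        mul_le_mul_of_nonneg_right (by omega) (by omega)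
      have henter : j * (a + b) < time := lt_of_le_of_lt hmono hk0'
      obtain ⟨f', rfl⟩ : ∃ f', f = f' + 1 + 1 := ⟨f - 2, by omega⟩
      by_cases hjk1e : j = k1
      · -- odd exit
        subst hjk1e
        have hexit : ¬ (j * (a + b) + a < time) := by omega
        have hk : j < k0 := hjlt
        simp [w8loop, henter, hexit, hk]
      · have hjlt1 : j < k1 := lt_of_le_of_ne hjk1 hjk1e
        have hmono1 : j * (a + b) + a ≤ (k1 - 1) * (a + b) + a := by
          have := mul_le_mul_of_nonneg_right (show j ≤ k1 - 1 by omega) (show (0:Int) ≤ a + b by omega)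
          omega
        have henter1 : j * (a + b) + a < time := lt_of_le_of_lt hmono1 hk1'
        have hstep : j * (a + b) + a + b = (j + 1) * (a + b) := by ring
        have := ih (j + 1) f' (by omega) (by omega) (by omega) (by omega) (by omega)
        simp only [w8loop, if_pos henter, if_pos henter1]
        simp only [if_true]
        rw [hstep] at *
        exact this

theorem w8_spec : Claim_equal_w8 := by
  intro time light _ hpre
  unfold Spec_w8 w8 w8_alt
  dsimp only
  by_cases ht : time ≤ 0
  · have h0 : ¬ ((0:Int) < time) := by omega
    obtain ⟨f, hf⟩ : ∃ f, 2 * time.toNat + 2 = f + 1 := ⟨2 * time.toNat + 1, by omega⟩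
    rw [hf]
    simp only [w8loop, if_neg h0]
    simp only [show (true = false) = False from by simp, true_and, false_and, if_false]
    split_ifs <;> omega
  · have ht' : 0 < time := by omega
    have hpre' : 2 ≤ light.length ∧
        (time ≤ PySem.List.pyGetD light 1 0 ∨
          (3 ≤ light.length ∧ 1 ≤ PySem.List.pyGetD light 1 0 + PySem.List.pyGetD light 2 0)) := by
      rcases hpre with h | h
      · omega
      · exact h
    set a := PySem.List.pyGetD light 1 0 with ha
    set b := PySem.List.pyGetD light 2 0 with hb
    by_cases hta : time ≤ a
    · -- one iteration, exit with count = a, curr = False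
      obtain ⟨f, hf⟩ : ∃ f, 2 * time.toNat + 2 = f + 1 + 1 := ⟨2 * time.toNat, by omega⟩
      rw [hf]
      have h1 : (0:Int) < time := ht'
      have h2 : ¬ (a < time) := by omega
      simp only [w8loop, if_pos h1, if_true, zero_add, if_neg h2]
      simp only [if_neg ht, if_pos hta]
      simp only [show (false = true) = False from by simp, false_and, true_and, if_false]
      split_ifs <;> omega
    · -- closed form: cycle sum s = a + b ≥ 1
      have hs : 1 ≤ a + b := by
        rcases hpre'.2 with h | h
        · omega
        · exact h.2
      have hspos : 0 < a + b := by omega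
      set k0 := -(PySem.Int.floordiv (-time) (a + b)) with hk0def
      set k1 := -(PySem.Int.floordiv (a - time) (a + b)) with hk1def
      have hk0b : (k0 - 1) * (a + b) < time ∧ time ≤ k0 * (a + b) :=
        (PySem.Int.neg_floordiv_neg_eq_iff_of_pos hspos).mp hk0def.symm
      have hk1b : (k1 - 1) * (a + b) < time - a ∧ time - a ≤ k1 * (a + b) := by
      -- a - time = -(time - a)
        have heq : a - time = -(time - a) := by ring
        rw [heq] at hk1def
        exact (PySem.Int.neg_floordiv_neg_eq_iff_of_pos hspos).mp hk1def.symm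
      have hk0pos : 1 ≤ k0 := by nlinarith [hk0b.2]
      have hk1pos : 1 ≤ k1 := by nlinarith [hk1b.2]
      have hk0le : k0 ≤ time := by nlinarith [hk0b.1]
      have hchar := w8loop_char time a b k0 k1 hs hk0b.2 hk0b.1 (by omega) (by omega)
        k0.toNat 0 (2 * time.toNat + 2) (by omega) (by omega) (by omega) (by omega) (by omega)
      rw [zero_mul] at hchar
      rw [hchar]
      simp only [if_neg ht, if_neg hta]
      by_cases hk : k1 < k0
      · simp only [if_pos hk]
        have hc : time ≤ k1 * (a + b) + a := by omega
        simp only [show (false = true) = False from by simp, false_and, true_and, if_false]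
        split_ifs <;> omega
      · simp only [if_neg hk]
        have hc : time ≤ k0 * (a + b) := hk0b.2
        simp only [show (true = false) = False from by simp, false_and, true_and, if_false]
        split_ifs <;> omega
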